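-- pv_equiv track=rewrite | github.com/eman972/sahih-al-bukhari | python/sahih_al_bukhari/cli.py | _highlight
-- ===== SOURCE A (Python) =====
-- RESET = "\x1b[0m"; BOLD = "\x1b[1m"; DIM = "\x1b[2m"
--
-- def _highlight(text, term):
--     if not term:
--         return text
--     lower = text.lower()
--     tl    = term.lower()
--     out   = []
--     i     = 0
--     while i < len(text):
--         idx = lower.find(tl, i)
--         if idx == -1:
--             out.append(text[i:]); break
--         out.append(text[i:idx])
--         out.append(f"\x1b[1m\x1b[33m{text[idx:idx+len(term)]}{RESET}")
--         i = idx + len(term)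
--     return "".join(out)
-- ===== SOURCE B (Python) =====
-- RESET = "\x1b[0m"
--
-- def _highlight(text, term):
--     if not term:
--         return text
--     lower = text.lower()
--     tl = term.lower()
--     n = len(term)
--     out = []
--     pos = 0
--     while pos < len(text):
--         if lower[pos:pos+n] == tl:
--             out.append("\x1b[1m\x1b[33m" + text[pos:pos+n] + RESET)
--             pos += n
--         else:
--             out.append(text[pos:pos+1])
--             pos += 1
--     return "".join(out)
-- ===== Notes on version B (the rewrite author's own statement) =====
-- stated objective: alternative
-- what changed: B replaces A's find()-based jump-to-next-occurrence loop (which rescans via str.find and splices inter-match slices) by a uniform cursor scan that compares the lowered window lower[pos:pos+n] against the lowered term at every position, emitting one character or one wrapped match per step.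
import Mathlib
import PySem

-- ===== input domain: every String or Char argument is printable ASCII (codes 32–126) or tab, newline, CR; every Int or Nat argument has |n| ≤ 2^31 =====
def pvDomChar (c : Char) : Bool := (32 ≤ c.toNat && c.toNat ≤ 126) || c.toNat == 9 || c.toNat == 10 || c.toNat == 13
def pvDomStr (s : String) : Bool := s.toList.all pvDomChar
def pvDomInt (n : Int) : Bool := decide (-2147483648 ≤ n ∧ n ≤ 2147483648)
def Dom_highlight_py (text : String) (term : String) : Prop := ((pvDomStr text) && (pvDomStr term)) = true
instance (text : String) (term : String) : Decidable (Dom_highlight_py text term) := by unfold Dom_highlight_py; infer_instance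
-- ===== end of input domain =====

-- B replaces A's find()-based jump loop by a uniform cursor scan comparing the lowered
-- window lower[pos:pos+n] with the lowered term at each position; same cost, different decomposition.

-- ===== PORT A =====
-- shared string literals of both Pythons
def pvHL : List Char := "\x1b[1m\x1b[33m".toList
def pvRESET : List Char := "\x1b[0m".toList

-- A's while loop: i = cursor, out = accumulated pieces; 'lower'/'tl' are A's locals.
-- The two proof arguments only justify termination (i strictly increases each iteration).
def loopA (text lower tl : List Char) (n i : Nat) (out : List (List Char))
    (hlow : lower.length = text.length) (hn : 0 < n) : List (List Char) :=
  if hi : i < text.length then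
    let idx := PySem.Chars.findFrom lower tl (i : Int)
    if hidx : idx = -1 then
      out ++ [PySem.List.slice text (some (i : Int)) none]
    else
      loopA text lower tl n (idx.toNat + n)
        (out ++ [PySem.List.slice text (some (i : Int)) (some idx),
                 pvHL ++ PySem.List.slice text (some idx) (some (idx + (n : Int))) ++ pvRESET])
        hlow hn
  else out
termination_by text.length - i
decreasing_by
  have h1 := (PySem.Chars.findFrom_natCast_spec lower tl i (by omega) hidx).1
  omega

def highlight_py (text : String) (term : String) : String :=
  if h : term.toList = [] then text
  else
    String.mk (PySem.Chars.join []
      (loopA text.toList (PySem.Chars.lower text.toList) (PySem.Chars.lower term.toList)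
        term.toList.length 0 [] (by simp [PySem.Chars.lower]) (List.length_pos_iff.mpr h)))

-- ===== PORT B =====
-- B's while loop: at each pos compare lower[pos:pos+n] with tl; emit one wrapped match or one char.
def scanB (text lower tl : List Char) (n pos : Nat) (out : List (List Char)) (hn : 0 < n) :
    List (List Char) :=
  if hp : pos < text.length then
    if PySem.List.slice lower (some (pos : Int)) (some ((pos : Int) + (n : Int))) = tl then
      scanB text lower tl n (pos + n)
        (out ++ [pvHL ++ PySem.List.slice text (some (pos : Int)) (some ((pos : Int) + (n : Int))) ++ pvRESET]) hn
    else
      scanB text lower tl n (pos + 1)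
        (out ++ [PySem.List.slice text (some (pos : Int)) (some ((pos : Int) + 1))]) hn
  else out
termination_by text.length - pos
decreasing_by all_goals omega

def highlight_py_alt (text : String) (term : String) : String :=
  if h : term.toList = [] then text
  else
    String.mk (PySem.Chars.join []
      (scanB text.toList (PySem.Chars.lower text.toList) (PySem.Chars.lower term.toList)
        term.toList.length 0 [] (List.length_pos_iff.mpr h)))

-- ===== PRECONDITION & SPEC =====
def Spec_highlight_py (text : String) (term : String) (out : String) : Prop := out = highlight_py_alt text term
instance (text : String) (term : String) (out : String) : Decidable (Spec_highlight_py text term out) := by unfold Spec_highlight_py; infer_instance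

-- ===== CLAIM (what is proved, stated in full; the proofs are below) =====
def Claim_equal_highlight_py : Prop := ∀ (text : String) (term : String), Dom_highlight_py text term → Spec_highlight_py text term (highlight_py text term)

-- ===== LEMMAS AND PROOFS =====

lemma join_nil_flatten (ps : List (List Char)) : PySem.Chars.join [] ps = ps.flatten := by
  induction ps with
  | nil => simp [PySem.Chars.join, List.intercalate]
  | cons a rest ih =>
    cases rest with
    | nil => simp [PySem.Chars.join, List.intercalate]
    | cons b r =>
      rw [PySem.Chars.join_cons_cons]
      simp only [List.flatten_cons]
      rw [show PySem.Chars.join [] (b :: r) = (b :: r).flatten from ih]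
      simp

lemma loopA_append (text lower tl : List Char) (n : Nat)
    (hlow : lower.length = text.length) (hn : 0 < n) :
    ∀ fuel i out₁ out₂, text.length - i ≤ fuel →
      loopA text lower tl n i (out₁ ++ out₂) hlow hn
        = out₁ ++ loopA text lower tl n i out₂ hlow hn := by
  intro fuel
  induction fuel with
  | zero =>
    intro i out₁ out₂ hf
    have hge : ¬ i < text.length := by omega
    conv_lhs => rw [loopA]
    conv_rhs => rw [loopA]
    simp [hge]
  | succ f ih =>
    intro i out₁ out₂ hf
    conv_lhs => rw [loopA]
    conv_rhs => rw [loopA]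
    by_cases hi : i < text.length
    · simp only [dif_pos hi]
      by_cases hidx : PySem.Chars.findFrom lower tl (i : Int) = -1
      · simp [hidx]
      · simp only [dif_neg hidx]
        have hge := (PySem.Chars.findFrom_natCast_spec lower tl i (by omega) hidx).1
        rw [List.append_assoc]
        exact ih ((PySem.Chars.findFrom lower tl (i : Int)).toNat + n) _ _ (by omega)
    · simp [hi]

lemma scanB_append (text lower tl : List Char) (n : Nat) (hn : 0 < n) :
    ∀ fuel pos out₁ out₂, text.length - pos ≤ fuel →
      scanB text lower tl n pos (out₁ ++ out₂) hn
        = out₁ ++ scanB text lower tl n pos out₂ hn := by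
  intro fuel
  induction fuel with
  | zero =>
    intro pos out₁ out₂ hf
    have hge : ¬ pos < text.length := by omega
    conv_lhs => rw [scanB]
    conv_rhs => rw [scanB]
    simp [hge]
  | succ f ih =>
    intro pos out₁ out₂ hf
    conv_lhs => rw [scanB]
    conv_rhs => rw [scanB]
    by_cases hp : pos < text.length
    · simp only [dif_pos hp]
      by_cases hm : PySem.List.slice lower (some (pos : Int)) (some ((pos : Int) + (n : Int))) = tl
      · simp only [if_pos hm]
        rw [List.append_assoc]
        exact ih (pos + n) _ _ (by omega)
      · simp only [if_neg hm]
        rw [List.append_assoc]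
        exact ih (pos + 1) _ _ (by omega)
    · simp [hp]

lemma scanB_pop (text lower tl : List Char) (n pos : Nat) (out : List (List Char)) (hn : 0 < n) :
    scanB text lower tl n pos out hn = out ++ scanB text lower tl n pos [] hn := by
  have := scanB_append text lower tl n hn (text.length - pos) pos out [] (le_refl _)
  simpa using this

lemma loopA_pop (text lower tl : List Char) (n i : Nat) (out : List (List Char))
    (hlow : lower.length = text.length) (hn : 0 < n) :
    loopA text lower tl n i out hlow hn = out ++ loopA text lower tl n i [] hlow hn := by
  have := loopA_append text lower tl n hlow hn (text.length - i) i out [] (le_refl _)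
  simpa using this

-- if the lowered window at pos equals tl then tl is a prefix of lower.drop pos
lemma window_prefix (lower tl : List Char) (pos n : Nat)
    (h : PySem.List.slice lower (some (pos : Int)) (some ((pos : Int) + (n : Int))) = tl) :
    tl <+: lower.drop pos := by
  rw [PySem.List.slice_natCast_add] at h
  rw [← h]
  exact List.take_prefix _ _

-- when tl occurs nowhere in lower.drop i, B copies text.drop i verbatim
lemma scanB_nomatch (text lower tl : List Char) (n : Nat) (hn : 0 < n)
    (hlen : lower.length = text.length) :
    ∀ fuel i, text.length - i ≤ fuel → ¬ tl <:+: lower.drop i →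
      (scanB text lower tl n i [] hn).flatten = text.drop i := by
  intro fuel
  induction fuel with
  | zero =>
    intro i hf hno
    have hge : ¬ i < text.length := by omega
    have hnil : text.drop i = [] := List.drop_eq_nil_of_le (by omega)
    rw [scanB]
    simp [hge, hnil]
  | succ f ih =>
    intro i hf hno
    by_cases hp : i < text.length
    · rw [scanB]
      simp only [dif_pos hp]
      have hne : ¬ PySem.List.slice lower (some (i : Int)) (some ((i : Int) + (n : Int))) = tl := by
        intro h
        exact hno ((window_prefix lower tl i n h).isInfix)
      rw [if_neg hne]
      rw [scanB_pop]
      have hno' : ¬ tl <:+: lower.drop (i + 1) := by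
        intro h
        have h1 : lower.drop (i + 1) = (lower.drop i).drop 1 := by
          simp [List.drop_drop]
        rw [h1] at h
        exact hno (h.trans (List.drop_suffix 1 (lower.drop i)).isInfix)
      have hrec := ih (i + 1) (by omega) hno'
      have hsl : PySem.List.slice text (some (i : Int)) (some ((i : Int) + 1)) = (text.drop i).take 1 := by
        have h2 := PySem.List.slice_natCast_add text i 1
        simpa using h2
      simp only [List.flatten_append, List.flatten_cons, List.flatten_nil, List.append_nil,
        List.nil_append, hrec, hsl]
      rw [← List.getElem_cons_drop hp]
      simp
    · have hnil : text.drop i = [] := List.drop_eq_nil_of_le (by omega)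
      rw [scanB]
      simp [hp, hnil]

-- skipping d non-matching positions, B copies (text.drop i).take d
lemma scanB_skip (text lower tl : List Char) (n : Nat) (hn : 0 < n)
    (hlen : lower.length = text.length) :
    ∀ d i, i + d ≤ text.length → (∀ m, i ≤ m → m < i + d → ¬ tl <+: lower.drop m) →
      (scanB text lower tl n i [] hn).flatten
        = (text.drop i).take d ++ (scanB text lower tl n (i + d) [] hn).flatten := by
  intro d
  induction d with
  | zero => intro i _ _; simp
  | succ d ih =>
    intro i hle hno
    have hp : i < text.length := by omega
    conv_lhs => rw [scanB]
    simp only [dif_pos hp]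
    have hne : ¬ PySem.List.slice lower (some (i : Int)) (some ((i : Int) + (n : Int))) = tl := by
      intro h
      exact hno i (le_refl _) (by omega) (window_prefix lower tl i n h)
    rw [if_neg hne]
    rw [scanB_pop]
    have hrec := ih (i + 1) (by omega) (fun m hm1 hm2 => hno m (by omega) (by omega))
    have hsl : PySem.List.slice text (some (i : Int)) (some ((i : Int) + 1)) = (text.drop i).take 1 := by
      have h2 := PySem.List.slice_natCast_add text i 1
      simpa using h2
    have e1 : i + (d + 1) = i + 1 + d := by omega
    rw [e1]
    simp only [List.flatten_append, List.flatten_cons, List.flatten_nil, List.append_nil,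
      List.nil_append, hrec, hsl]
    have hdrop : text.drop i = text[i] :: text.drop (i + 1) := (List.getElem_cons_drop hp).symm
    rw [hdrop]
    simp only [List.take_succ_cons, List.take_zero, List.singleton_append, List.cons_append, List.nil_append]

-- main induction: from any cursor i the two loops produce the same flattened output
lemma main_eq (text lower tl : List Char) (n : Nat) (hn : 0 < n)
    (hlen : lower.length = text.length) (htl : tl.length = n) :
    ∀ fuel i (hlow : lower.length = text.length), text.length - i ≤ fuel →
      (loopA text lower tl n i [] hlow hn).flatten = (scanB text lower tl n i [] hn).flatten := by
  intro fuel
  induction fuel with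
  | zero =>
    intro i hlow hf
    have hge : ¬ i < text.length := by omega
    rw [loopA, scanB]
    simp [hge]
  | succ f ih =>
    intro i hlow hf
    by_cases hp : i < text.length
    · rw [loopA]
      simp only [dif_pos hp]
      by_cases hidx : PySem.Chars.findFrom lower tl (i : Int) = -1
      · simp only [dif_pos hidx]
        have hno : ¬ tl <:+: lower.drop i :=
          (PySem.Chars.findFrom_natCast_eq_neg_one_iff lower tl i (by omega)).mp hidx
        rw [scanB_nomatch text lower tl n hn hlen (f + 1) i hf hno]
        simp [PySem.List.slice_from_natCast]
      · simp only [dif_neg hidx]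
        obtain ⟨hge, hpre, hmin⟩ :=
          PySem.Chars.findFrom_natCast_spec lower tl i (by omega) hidx
        set idxI := PySem.Chars.findFrom lower tl (i : Int) with hidxI
        set j := idxI.toNat with hj
        have hcast : idxI = (j : Int) := by omega
        have hjlen : j + n ≤ text.length := by
          have h3 := hpre.length_le
          simp only [List.length_drop] at h3
          omega
        have hji : i ≤ j := by omega
        rw [loopA_pop]
        have hs1 : PySem.List.slice text (some (i : Int)) (some idxI)
            = (text.drop i).take (j - i) := by
          rw [hcast, PySem.List.slice_natCast]
        have hs2 : PySem.List.slice text (some idxI) (some (idxI + (n : Int)))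
            = (text.drop j).take n := by
          rw [hcast, PySem.List.slice_natCast_add]
        rw [hs1, hs2]
        rw [scanB_skip text lower tl n hn hlen (j - i) i (by omega)
          (fun m hm1 hm2 => hmin m hm1 (by omega))]
        have hij : i + (j - i) = j := by omega
        rw [hij]
        have hjp : j < text.length := by omega
        have hmatch : PySem.List.slice lower (some (j : Int)) (some ((j : Int) + (n : Int))) = tl := by
          rw [PySem.List.slice_natCast_add]
          have h4 := List.prefix_iff_eq_take.mp hpre
          rw [← htl, ← h4]
        conv_rhs => rw [scanB]
        simp only [dif_pos hjp, if_pos hmatch]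
        rw [scanB_pop]
        have hrec := ih (j + n) hlow (by omega)
        rw [PySem.List.slice_natCast_add text j n]
        simp only [List.flatten_append, List.flatten_cons, List.flatten_nil, List.append_nil,
          List.nil_append, hrec]
        simp
    · rw [loopA, scanB]
      simp [hp]

-- ===== VERDICT (by name: the statement is the Claim_ definition above) =====
theorem highlight_py_spec : Claim_equal_highlight_py := by
  intro text term _
  unfold Spec_highlight_py
  unfold highlight_py highlight_py_alt
  by_cases h : term.toList = []
  · simp [h]
  · simp only [dif_neg h]
    congr 1
    rw [join_nil_flatten, join_nil_flatten]
    exact main_eq text.toList (PySem.Chars.lower text.toList) (PySem.Chars.lower term.toList)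
      term.toList.length (List.length_pos_iff.mpr h)
      (by simp [PySem.Chars.lower]) (by simp [PySem.Chars.lower])
      text.toList.length 0 (by simp [PySem.Chars.lower]) (by omega)
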